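-- pv_equiv track=rewrite | github.com/MarcinSerafin03/bit-algo-start-24-25-WDI | Zestaw 2/76.py | mask_sume
-- ===== SOURCE A (Python) =====
-- def mask_sume(t1, t2, mask):
--     sume = 0
--     T=[0]*len(t1)
--     for i in range(len(t1)):
--         if mask % 3 == 0:
--             sume += t1[i]
--             T[i] = t1[i]
--         elif mask % 3 == 1:
--             sume += t2[i]
--             T[i] = t2[i]
--         elif mask % 3 == 2:
--             sume += t1[i] + t2[i]
--             T[i] = t1[i] + t2[i]
--         mask //= 3
--
--     return sume,T
--
-- t1 = [1, 3,2,4]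
--
-- t2 = [9,7,4,8]
-- ===== SOURCE B (Python) =====
-- def mask_sume(t1, t2, mask):
--     # Divide and conquer: split the position range in half; the left half is
--     # selected with mask itself, the right half with mask shifted down by k
--     # base-3 digits (mask // 3**k); combine by concatenation and addition.
--     if not t1:
--         return 0, []
--     if len(t1) == 1:
--         r = mask % 3
--         h = t1[0] if r == 0 else (t2[0] if r == 1 else t1[0] + t2[0])
--         return h, [h]
--     k = len(t1) // 2
--     s1, L = mask_sume(t1[:k], t2[:k], mask)
--     s2, R = mask_sume(t1[k:], t2[k:], mask // 3**k)
--     return s1 + s2, L + R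
-- ===== Notes on version B (the rewrite author's own statement) =====
-- stated objective: alternative
-- what changed: B is a divide-and-conquer recursion that splits the index range in half, solves the left half with mask and the right half with mask // 3**k, and combines by list concatenation and addition, instead of A's single left-to-right loop that mutates a preallocated table while floor-dividing the mask in place.
import Mathlib
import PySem

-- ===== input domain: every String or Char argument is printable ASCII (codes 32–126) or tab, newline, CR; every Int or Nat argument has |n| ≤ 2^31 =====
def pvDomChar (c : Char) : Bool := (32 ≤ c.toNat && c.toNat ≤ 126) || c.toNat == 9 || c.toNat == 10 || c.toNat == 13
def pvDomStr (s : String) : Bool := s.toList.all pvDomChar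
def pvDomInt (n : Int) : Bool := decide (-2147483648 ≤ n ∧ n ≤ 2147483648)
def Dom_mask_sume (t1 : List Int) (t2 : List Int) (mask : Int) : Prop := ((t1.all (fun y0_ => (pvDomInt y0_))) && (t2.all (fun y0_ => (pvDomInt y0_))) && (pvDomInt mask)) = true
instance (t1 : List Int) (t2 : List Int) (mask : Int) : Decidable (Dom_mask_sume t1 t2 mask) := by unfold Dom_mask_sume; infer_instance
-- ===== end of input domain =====

-- B re-implements A by divide and conquer (halve the index range, shift the mask by
-- 3^k for the right half, concatenate) instead of A's fused left-to-right loop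
-- (alternative decomposition, same results).


-- ===== PORT A =====
-- loop body: state (sume, T, mask); branch order and updates exactly as in A.
def maskSumeStepA (t1 t2 : List Int) (st : Int × List Int × Int) (i : Int) : Int × List Int × Int :=
  let sume := st.1
  let T := st.2.1
  let m := st.2.2
  if PySem.Int.mod m 3 = 0 then
    let v := (PySem.List.pyGet? t1 i).getD 0
    (sume + v, T.set i.toNat v, PySem.Int.floordiv m 3)
  else if PySem.Int.mod m 3 = 1 then
    let v := (PySem.List.pyGet? t2 i).getD 0
    (sume + v, T.set i.toNat v, PySem.Int.floordiv m 3)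
  else if PySem.Int.mod m 3 = 2 then
    let v := (PySem.List.pyGet? t1 i).getD 0 + (PySem.List.pyGet? t2 i).getD 0
    (sume + v, T.set i.toNat v, PySem.Int.floordiv m 3)
  else
    (sume, T, PySem.Int.floordiv m 3)

def mask_sume (t1 : List Int) (t2 : List Int) (mask : Int) : Int × List Int :=
  let st := (PySem.List.pyRange 0 t1.length 1).foldl (maskSumeStepA t1 t2)
    (0, List.replicate t1.length 0, mask)
  (st.1, st.2.1)

-- ===== PORT B =====
-- divide and conquer exactly as in Source B; t1[:k]/t1[k:] with k = len(t1)//2 ≥ 0 are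
-- List.take/List.drop (exact: PySem.List.slice_to_natCast / slice_from_natCast).
-- The fuel argument (= t1.length at the top call) is only a structural-termination
-- guard: each recursive call strictly shrinks t1, so it is never exhausted.
def maskSumeAltGo (fuel : Nat) (t1 t2 : List Int) (mask : Int) : Int × List Int :=
  match fuel with
  | 0 => (0, [])
  | Nat.succ fuel =>
    if t1 = [] then (0, [])
    else if t1.length = 1 then
      let r := PySem.Int.mod mask 3
      let h := if r = 0 then (PySem.List.pyGet? t1 0).getD 0
               else if r = 1 then (PySem.List.pyGet? t2 0).getD 0
               else (PySem.List.pyGet? t1 0).getD 0 + (PySem.List.pyGet? t2 0).getD 0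
      (h, [h])
    else
      let k := t1.length / 2
      let left := maskSumeAltGo fuel (t1.take k) (t2.take k) mask
      let right := maskSumeAltGo fuel (t1.drop k) (t2.drop k) (PySem.Int.floordiv mask (3 ^ k))
      (left.1 + right.1, left.2 ++ right.2)

def mask_sume_alt (t1 : List Int) (t2 : List Int) (mask : Int) : Int × List Int :=
  maskSumeAltGo t1.length t1 t2 mask

-- ===== PRECONDITION & SPEC =====
-- Pre_ excludes exactly the inputs on which A raises IndexError: some position i of t1
-- whose base-3 digit of mask is 1 or 2 has no corresponding element t2[i].
def Pre_mask_sume (t1 : List Int) (t2 : List Int) (mask : Int) : Prop :=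
  ∀ i : Nat, i < t1.length →
    PySem.Int.mod (PySem.Int.floordiv mask (3 ^ i)) 3 ≠ 0 → i < t2.length
instance (t1 : List Int) (t2 : List Int) (mask : Int) : Decidable (Pre_mask_sume t1 t2 mask) := by unfold Pre_mask_sume; infer_instance
def pvWitness_mask_sume : List Int × List Int × Int := ([1, 3, 2, 4], [9, 7, 4, 8], 50)

def Spec_mask_sume (t1 : List Int) (t2 : List Int) (mask : Int) (out : Int × List Int) : Prop := out = mask_sume_alt t1 t2 mask
instance (t1 : List Int) (t2 : List Int) (mask : Int) (out : Int × List Int) : Decidable (Spec_mask_sume t1 t2 mask out) := by unfold Spec_mask_sume; infer_instance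

-- ===== CLAIM (what is proved, stated in full; the proofs are below) =====
def Claim_equal_mask_sume : Prop := ∀ (t1 : List Int) (t2 : List Int) (mask : Int), Dom_mask_sume t1 t2 mask → Pre_mask_sume t1 t2 mask → Spec_mask_sume t1 t2 mask (mask_sume t1 t2 mask)

-- ===== LEMMAS AND PROOFS =====

-- canonical per-index value both ports are reduced to
def maskSumePick (t1 t2 : List Int) (mask : Int) (i : Nat) : Int :=
  let trit := PySem.Int.mod (PySem.Int.floordiv mask (3 ^ i)) 3
  if trit = 0 then (PySem.List.pyGet? t1 (i : Int)).getD 0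
  else if trit = 2 then (PySem.List.pyGet? t1 (i : Int)).getD 0 + (PySem.List.pyGet? t2 (i : Int)).getD 0
  else (PySem.List.pyGet? t2 (i : Int)).getD 0

def maskSumeL (t1 t2 : List Int) (mask : Int) : List Int :=
  (List.range t1.length).map (maskSumePick t1 t2 mask)

theorem floordiv_floordiv (a b c : Int) (hb : 0 < b) (hc : 0 < c) :
    PySem.Int.floordiv (PySem.Int.floordiv a b) c = PySem.Int.floordiv a (b * c) := by
  rw [PySem.Int.floordiv_eq_ediv_of_pos hb, PySem.Int.floordiv_eq_ediv_of_pos hc,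
      PySem.Int.floordiv_eq_ediv_of_pos (by positivity)]
  rw [Int.ediv_ediv_of_nonneg (le_of_lt hb)]

theorem floordiv_floordiv_pow (a : Int) (k : Nat) :
    PySem.Int.floordiv (PySem.Int.floordiv a (3 ^ k)) 3 = PySem.Int.floordiv a (3 ^ (k + 1)) := by
  rw [floordiv_floordiv _ _ _ (by positivity) (by norm_num), ← pow_succ]

theorem mod3_range (a : Int) : PySem.Int.mod a 3 = 0 ∨ PySem.Int.mod a 3 = 1 ∨ PySem.Int.mod a 3 = 2 := by
  rw [PySem.Int.mod_eq_emod_of_pos (by norm_num)]; omega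

theorem set_mid (l1 l2 : List Int) (k : Nat) (hl : l1.length = k) (v : Int) :
    (l1 ++ l2).set k v = l1 ++ l2.set 0 v := by
  subst hl; rw [List.set_append_right _ _ (le_refl _)]; simp

theorem maskSumeA_invariant (t1 t2 : List Int) (mask : Int) (k : Nat) (hk : k ≤ t1.length) :
    (PySem.List.pyRange 0 (k:Int) 1).foldl (maskSumeStepA t1 t2) (0, List.replicate t1.length 0, mask)
      = (((List.range k).map (maskSumePick t1 t2 mask)).foldl (· + ·) 0,
         ((List.range k).map (maskSumePick t1 t2 mask)) ++ List.replicate (t1.length - k) 0,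
         PySem.Int.floordiv mask (3 ^ k)) := by
  induction k with
  | zero =>
      simp only [Nat.cast_zero]
      rw [PySem.List.pyRange_one_eq_nil (le_refl 0)]
      simp
  | succ k ih =>
      have hk' : k ≤ t1.length := Nat.le_of_succ_le hk
      have hcast : ((k+1 : Nat) : Int) = (k : Int) + 1 := by push_cast; ring
      rw [hcast, PySem.List.pyRange_one_succ_right (by positivity), List.foldl_append, ih hk']
      have hlen : ((List.range k).map (maskSumePick t1 t2 mask)).length = k := by simp
      have hrepl : List.replicate (t1.length - k) (0:Int)
          = 0 :: List.replicate (t1.length - (k+1)) 0 := by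
        have : t1.length - k = (t1.length - (k+1)) + 1 := by omega
        rw [this, List.replicate_succ]
      have hpick : maskSumePick t1 t2 mask k
          = (if PySem.Int.mod (PySem.Int.floordiv mask (3 ^ k)) 3 = 0 then (PySem.List.pyGet? t1 (k:Int)).getD 0
             else if PySem.Int.mod (PySem.Int.floordiv mask (3 ^ k)) 3 = 2 then (PySem.List.pyGet? t1 (k:Int)).getD 0 + (PySem.List.pyGet? t2 (k:Int)).getD 0
             else (PySem.List.pyGet? t2 (k:Int)).getD 0) := by
        simp [maskSumePick]
      rcases mod3_range (PySem.Int.floordiv mask (3 ^ k)) with hr | hr | hr <;>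
        simp only [maskSumeStepA, hr, hpick, List.range_succ,
          List.map_append, List.map_cons, List.map_nil, List.foldl_append, List.foldl_cons,
          List.foldl_nil, floordiv_floordiv_pow, Int.toNat_natCast] <;>
        rw [set_mid _ _ k hlen, hrepl] <;> simp

theorem pick_take (t1 t2 : List Int) (mask : Int) (k i : Nat) (hi : i < k) :
    maskSumePick (t1.take k) (t2.take k) mask i = maskSumePick t1 t2 mask i := by
  simp only [maskSumePick, PySem.List.pyGet?_natCast, List.getElem?_take, hi, if_true]

theorem pick_drop (t1 t2 : List Int) (mask : Int) (k i : Nat) :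
    maskSumePick (t1.drop k) (t2.drop k) (PySem.Int.floordiv mask (3 ^ k)) i
      = maskSumePick t1 t2 mask (k + i) := by
  have htrit : PySem.Int.floordiv (PySem.Int.floordiv mask (3 ^ k)) (3 ^ i)
      = PySem.Int.floordiv mask (3 ^ (k + i)) := by
    rw [floordiv_floordiv _ _ _ (by positivity) (by positivity), ← pow_add]
  simp only [maskSumePick, htrit, PySem.List.pyGet?_natCast, List.getElem?_drop]

theorem maskSumeL_split (t1 t2 : List Int) (mask : Int) (k : Nat) (hk : k ≤ t1.length) :
    maskSumeL t1 t2 mask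
      = maskSumeL (t1.take k) (t2.take k) mask
        ++ maskSumeL (t1.drop k) (t2.drop k) (PySem.Int.floordiv mask (3 ^ k)) := by
  unfold maskSumeL
  obtain ⟨m, hm⟩ : ∃ m, t1.length = k + m := ⟨t1.length - k, by omega⟩
  have h1 : (t1.take k).length = k := by simp [List.length_take]; omega
  have h2 : (t1.drop k).length = m := by simp; omega
  rw [h1, h2, hm, List.range_add, List.map_append, List.map_map]
  congr 1
  · exact List.map_congr_left (fun i hi => (pick_take t1 t2 mask k i (List.mem_range.mp hi)).symm)
  · refine List.map_congr_left (fun i _ => ?_)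
    simp only [Function.comp_apply]
    exact (pick_drop t1 t2 mask k i).symm

theorem maskSumeAltGo_eq (fuel : Nat) (t1 t2 : List Int) (mask : Int)
    (hf : t1.length ≤ fuel) :
    maskSumeAltGo fuel t1 t2 mask = ((maskSumeL t1 t2 mask).sum, maskSumeL t1 t2 mask) := by
  induction fuel generalizing t1 t2 mask with
  | zero =>
      have : t1 = [] := List.eq_nil_of_length_eq_zero (by omega)
      subst this; simp [maskSumeAltGo, maskSumeL]
  | succ fuel ih =>
      rw [maskSumeAltGo]
      by_cases h0 : t1 = []
      · subst h0; simp [maskSumeL]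
      · by_cases h1 : t1.length = 1
        · simp only [h0, if_false, h1, if_true]
          have hL : maskSumeL t1 t2 mask = [maskSumePick t1 t2 mask 0] := by
            unfold maskSumeL; rw [h1]; rfl
          rw [hL]
          have hdiv : PySem.Int.floordiv mask ((3:Int) ^ (0:Nat)) = mask := by
            rw [pow_zero, PySem.Int.floordiv_eq_ediv_of_pos one_pos, Int.ediv_one]
          rcases mod3_range mask with hr | hr | hr <;>
            simp only [maskSumePick, hdiv, hr, List.sum_cons, List.sum_nil, add_zero,
              Nat.cast_zero] <;> norm_num
        · simp only [h0, if_false, h1, if_false]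
          have hlen2 : 2 ≤ t1.length := by
            cases t1 with
            | nil => exact absurd rfl h0
            | cons a t => cases t with
              | nil => exact absurd rfl h1
              | cons b t => simp
          set k := t1.length / 2 with hkdef
          have hk1 : 1 ≤ k := by omega
          have hklt : k < t1.length := by omega
          have hkle : k ≤ t1.length := le_of_lt hklt
          have htake : (t1.take k).length = k := by simp [List.length_take]; omega
          have hdrop : (t1.drop k).length = t1.length - k := by simp
          rw [ih _ _ _ (by rw [htake]; omega), ih _ _ _ (by rw [hdrop]; omega)]
          rw [maskSumeL_split t1 t2 mask k hkle]
          simp [List.sum_append]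

theorem maskSumeAlt_eq (t1 t2 : List Int) (mask : Int) :
    mask_sume_alt t1 t2 mask = ((maskSumeL t1 t2 mask).sum, maskSumeL t1 t2 mask) :=
  maskSumeAltGo_eq t1.length t1 t2 mask (le_refl _)

theorem foldl_add_eq_sum (L : List Int) : L.foldl (· + ·) 0 = L.sum := by
  have h := PySem.List.foldl_add (l := L) (a := (0:Int)) (g := fun x => x)
  simpa using h

-- ===== VERDICT (by name: the statement is the Claim_ definition above) =====
theorem mask_sume_spec : Claim_equal_mask_sume := by
  unfold Claim_equal_mask_sume Spec_mask_sume
  intro t1 t2 mask _ _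
  unfold mask_sume
  rw [maskSumeA_invariant t1 t2 mask t1.length (le_refl _), maskSumeAlt_eq]
  simp [maskSumeL, foldl_add_eq_sum]
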